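-- pv_equiv track=rewrite | github.com/samoilenko26/leet_code_repo | task_1_max_profit.py | find_min_price
-- ===== SOURCE A (Python) =====
-- from typing import List
--
-- def find_min_price(index: int, prices: List[int]) -> int:
--     min_price = prices[index]
--     for i in range(index, len(prices)):
--         if prices[i] < min_price:
--             min_price = prices[i]
--         if prices[i] > min_price:
--             return i - 1
--     return i
-- ===== SOURCE B (Python) =====
-- from typing import List
--
-- def find_min_price(index: int, prices: List[int]) -> int:
--     n = len(prices)
--     vals = [prices[index]] + [prices[i] for i in range(index + 1, n)]
--     rises = [t for t in range(1, len(vals)) if vals[t] > vals[t - 1]]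
--     return index + (rises[0] if rises else len(vals)) - 1
-- ===== Notes on version B (the rewrite author's own statement) =====
-- stated objective: alternative
-- what changed: B replaces A's single stateful scan (running-min accumulator with an early return inside the loop) by staged declarative passes: materialise the visited values, build the full list of adjacent-rise positions by comprehension, then compute the answer from the first rise (or a default) in one arithmetic expression; correct because until the first rise the visited sequence is nonincreasing, so the running min equals the previous element.
import Mathlib
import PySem

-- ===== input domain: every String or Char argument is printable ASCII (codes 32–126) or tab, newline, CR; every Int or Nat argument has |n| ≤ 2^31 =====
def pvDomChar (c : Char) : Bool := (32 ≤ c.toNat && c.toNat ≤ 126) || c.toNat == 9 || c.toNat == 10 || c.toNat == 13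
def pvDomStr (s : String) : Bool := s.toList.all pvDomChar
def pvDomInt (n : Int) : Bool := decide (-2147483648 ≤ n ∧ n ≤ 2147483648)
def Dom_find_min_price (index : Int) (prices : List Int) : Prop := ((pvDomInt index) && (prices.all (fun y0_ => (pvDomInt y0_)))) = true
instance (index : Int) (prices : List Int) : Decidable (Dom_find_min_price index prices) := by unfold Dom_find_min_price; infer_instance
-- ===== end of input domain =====

-- B replaces A's stateful early-exit scan by staged passes: materialise the visited
-- values, collect ALL adjacent-rise positions by comprehension, take the first (or a
-- default) by one arithmetic formula — no accumulator, no return-inside-loop (objective: alternative).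


-- ===== PORT A =====
-- A's for-loop over range(index, len(prices)); carries min_price and the last loop
-- variable i (returned when the range is exhausted). prices[i] via pyGetD (the default
-- is unreachable inside Pre_, where every i in the range is a valid Python index).
def find_min_price_loopA (prices : List Int) : List Int → Int → Int → Int
  | [], _, lastI => lastI
  | i :: rest, min_price, _ =>
    let p := PySem.List.pyGetD prices i 0
    let min_price := if p < min_price then p else min_price
    if p > min_price then i - 1 else find_min_price_loopA prices rest min_price i

def find_min_price (index : Int) (prices : List Int) : Int :=
  let min_price := PySem.List.pyGetD prices index 0
  -- initial lastI 0 is dead: inside Pre_ the range is nonempty (a Python empty range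
  -- here would mean prices[index] already raised)
  find_min_price_loopA prices (PySem.List.pyRange index (prices.length : Int) 1) min_price 0

-- ===== PORT B =====
-- Source B line by line: vals = [prices[index]] + [prices[i] for i in range(index+1, n)];
-- rises = [t for t in range(1, len(vals)) if vals[t] > vals[t-1]];
-- return index + (rises[0] if rises else len(vals)) - 1
def find_min_price_alt (index : Int) (prices : List Int) : Int :=
  let n : Int := (prices.length : Int)
  let vals : List Int := [PySem.List.pyGetD prices index 0]
      ++ (PySem.List.pyRange (index + 1) n 1).map (fun i => PySem.List.pyGetD prices i 0)
  let rises : List Int := (PySem.List.pyRange 1 (vals.length : Int) 1).filter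
      (fun t => PySem.List.pyGetD vals t 0 > PySem.List.pyGetD vals (t - 1) 0)
  index + (rises.head?.getD (vals.length : Int)) - 1

-- ===== PRECONDITION & SPEC =====
-- Pre_: exactly the inputs where prices[index] does not raise IndexError.
def Pre_find_min_price (index : Int) (prices : List Int) : Prop :=
  -(prices.length : Int) ≤ index ∧ index < (prices.length : Int)
instance (index : Int) (prices : List Int) : Decidable (Pre_find_min_price index prices) := by
  unfold Pre_find_min_price; infer_instance

def pvWitness_find_min_price : Int × List Int := (0, [7, 1, 5, 3, 6, 4])

def Spec_find_min_price (index : Int) (prices : List Int) (out : Int) : Prop := out = find_min_price_alt index prices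
instance (index : Int) (prices : List Int) (out : Int) : Decidable (Spec_find_min_price index prices out) := by unfold Spec_find_min_price; infer_instance

-- ===== CLAIM (what is proved, stated in full; the proofs are below) =====
def Claim_equal_find_min_price : Prop := ∀ (index : Int) (prices : List Int), Dom_find_min_price index prices → Pre_find_min_price index prices → Spec_find_min_price index prices (find_min_price index prices)

-- ===== LEMMAS AND PROOFS =====

-- Proof helper: A's loop with the running min replaced by the previous visited value
-- (equal to the running min until the first rise).
def prevLoop (prices : List Int) : Int → List Int → Int
  | _, [] => (prices.length : Int) - 1
  | prev, i :: rest =>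
    let cur := PySem.List.pyGetD prices i 0
    if cur > prev then i - 1 else prevLoop prices cur rest

-- Lockstep: on range(k, n) with A's lastI entering as k-1 and equal states, A's loop
-- agrees with prevLoop (whose exhausted case returns n-1 = the last i of the range).
theorem loopA_eq_prevLoop (prices : List Int) :
    ∀ (k prev : Int), k ≤ (prices.length : Int) →
      find_min_price_loopA prices (PySem.List.pyRange k (prices.length : Int) 1) prev (k - 1)
        = prevLoop prices prev (PySem.List.pyRange k (prices.length : Int) 1) := by
  intro k
  set n : Int := (prices.length : Int) with hn
  have main : ∀ (m : ℕ) (k prev : Int), k ≤ n → (n - k).toNat = m →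
      find_min_price_loopA prices (PySem.List.pyRange k n 1) prev (k - 1)
        = prevLoop prices prev (PySem.List.pyRange k n 1) := by
    intro m
    induction m with
    | zero =>
      intro k prev hk hm
      have hkn : k = n := by omega
      subst hkn
      rw [PySem.List.pyRange_one_eq_nil (le_refl _)]
      simp [find_min_price_loopA, prevLoop, hn]
    | succ m ih =>
      intro k prev hk hm
      have hkn : k < n := by omega
      rw [PySem.List.pyRange_one_cons hkn]
      simp only [find_min_price_loopA, prevLoop]
      set p := PySem.List.pyGetD prices k 0 with hp
      by_cases hgt : p > prev
      · have h1 : ¬ p < prev := by omega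
        simp [hgt, h1]
      · have hcont : ¬ (p > if p < prev then p else prev) := by split <;> omega
        have hst : (if p < prev then p else prev) = p := by
          by_cases h : p < prev
          · simp [h]
          · have : p = prev := by omega
            simp [this]
        rw [hst] at hcont ⊢
        simp only [hgt, hcont, if_false]
        have := ih (k + 1) p (by omega) (by omega)
        have hk1 : k + 1 - 1 = k := by ring
        rw [hk1] at this
        exact this
  exact fun prev hk => main (n - k).toNat k prev hk rfl

-- prevLoop on the absolute suffix range(index+j, n), entering with prev = vals[j-1],
-- equals B's formula restricted to relative positions ≥ j.
theorem prevLoop_eq_filter (index : Int) (prices : List Int)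
    (_hlo : -(prices.length : Int) ≤ index) (hhi : index < (prices.length : Int)) :
    ∀ (j : ℕ), 1 ≤ j → (j : Int) ≤ ((prices.length : Int) - index) →
      prevLoop prices
          (PySem.List.pyGetD
            ((PySem.List.pyRange index (prices.length : Int) 1).map
              (fun i => PySem.List.pyGetD prices i 0)) ((j : Int) - 1) 0)
          (PySem.List.pyRange (index + (j : Int)) (prices.length : Int) 1)
        = index + (((PySem.List.pyRange (j : Int) ((prices.length : Int) - index) 1).filter
            (fun t => PySem.List.pyGetD
                ((PySem.List.pyRange index (prices.length : Int) 1).map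
                  (fun i => PySem.List.pyGetD prices i 0)) t 0
              > PySem.List.pyGetD
                ((PySem.List.pyRange index (prices.length : Int) 1).map
                  (fun i => PySem.List.pyGetD prices i 0)) (t - 1) 0)).head?.getD
            ((prices.length : Int) - index)) - 1 := by
  intro j
  set n : Int := (prices.length : Int) with hn
  set g : Int → Int := fun i => PySem.List.pyGetD prices i 0 with hg
  set vals : List Int := (PySem.List.pyRange index n 1).map g with hvals
  have hvget : ∀ (k : ℕ), (k : Int) < n - index →
      PySem.List.pyGetD vals (k : Int) 0 = g (index + (k : Int)) := by
    intro k hk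
    rw [hvals]
    exact PySem.List.pyGetD_map_pyRange_one g index n k 0 (by omega)
  have main : ∀ (m : ℕ) (j : ℕ), 1 ≤ j → (j : Int) ≤ n - index → ((n - index) - j).toNat = m →
      prevLoop prices (PySem.List.pyGetD vals ((j : Int) - 1) 0)
          (PySem.List.pyRange (index + (j : Int)) n 1)
        = index + (((PySem.List.pyRange (j : Int) (n - index) 1).filter
            (fun t => PySem.List.pyGetD vals t 0 > PySem.List.pyGetD vals (t - 1) 0)).head?.getD
            (n - index)) - 1 := by
    intro m
    induction m with
    | zero =>
      intro j hj1 hjm hm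
      have hje : (j : Int) = n - index := by omega
      rw [hje]
      have h1 : index + (n - index) = n := by ring
      rw [h1, PySem.List.pyRange_one_eq_nil (le_refl _),
          PySem.List.pyRange_one_eq_nil (le_refl _)]
      simp [prevLoop, hn]
    | succ m ih =>
      intro j hj1 hjm hm
      have hjlt : (j : Int) < n - index := by omega
      have habs : index + (j : Int) < n := by omega
      rw [PySem.List.pyRange_one_cons habs, PySem.List.pyRange_one_cons hjlt]
      have hvj : PySem.List.pyGetD vals (j : Int) 0 = g (index + (j : Int)) := hvget j hjlt
      have hvj1 : PySem.List.pyGetD vals ((j : Int) - 1) 0 = g (index + (j : Int) - 1) := by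
        have hc : ((j : Int) - 1) = ((j - 1 : ℕ) : Int) := by omega
        rw [hc, hvget (j - 1) (by omega)]
        congr 1
        omega
      have hgP : PySem.List.pyGetD prices (index + (j : Int)) 0 = g (index + (j : Int)) := rfl
      simp only [prevLoop, List.filter_cons, hgP, hvj, hvj1]
      by_cases hgt : g (index + (j : Int)) > g (index + (j : Int) - 1)
      · simp [hgt]
      · have hdec : (decide (g (index + (j : Int)) > g (index + (j : Int) - 1))) = false := by
          simp [hgt]
        simp only [if_neg hgt, hdec]
        have hstep := ih (j + 1) (by omega) (by omega) (by omega)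
        have hc1 : ((j + 1 : ℕ) : Int) = (j : Int) + 1 := by push_cast; ring
        rw [hc1] at hstep
        have hc2 : (j : Int) + 1 - 1 = (j : Int) := by ring
        rw [hc2, hvj] at hstep
        have harith : index + ((j : Int) + 1) = index + (j : Int) + 1 := by ring
        rw [harith] at hstep
        exact hstep
  intro hj1 hjm
  exact main ((n - index) - j).toNat j hj1 hjm rfl

-- ===== VERDICT (by name: the statement is the Claim_ definition above) =====
theorem find_min_price_spec : Claim_equal_find_min_price := by
  intro index prices _ hpre
  obtain ⟨h1, h2⟩ := hpre
  unfold Spec_find_min_price find_min_price find_min_price_alt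
  set n : Int := (prices.length : Int) with hn
  set g : Int → Int := fun i => PySem.List.pyGetD prices i 0 with hg
  set vals : List Int := (PySem.List.pyRange index n 1).map g with hvals
  -- B's vals, written [prices[index]] ++ map over range(index+1,n), IS vals:
  have hsplit : [PySem.List.pyGetD prices index 0] ++ (PySem.List.pyRange (index + 1) n 1).map g
      = vals := by
    rw [hvals, PySem.List.pyRange_one_cons h2]
    rfl
  simp only [] at *
  rw [hsplit]
  have hm : (vals.length : Int) = n - index := by
    rw [hvals]
    simp [PySem.List.length_pyRange_one]
    omega
  -- A's first iteration: i = index, min_price compared to itself, never returns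
  rw [PySem.List.pyRange_one_cons h2]
  simp only [find_min_price_loopA]
  have hst : (if g index < g index then g index else g index) = g index := by simp
  rw [hst, if_neg (lt_irrefl (g index))]
  have hlock := loopA_eq_prevLoop prices (index + 1) (g index) (by omega)
  have hk1 : index + 1 - 1 = index := by ring
  rw [hk1] at hlock
  rw [hlock]
  have hmain := prevLoop_eq_filter index prices h1 h2 1 (le_refl 1) (by omega)
  have hc : ((1 : ℕ) : Int) = (1 : Int) := by norm_num
  rw [hc] at hmain
  have hv0 : PySem.List.pyGetD vals ((1 : Int) - 1) 0 = g index := by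
    have h01 : ((1 : Int) - 1) = ((0 : ℕ) : Int) := by norm_num
    rw [h01, hvals, PySem.List.pyGetD_map_pyRange_one g index n 0 0 (by omega)]
    norm_num
  rw [hv0] at hmain
  rw [hm]
  exact hmain
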